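-- pv_equiv track=rewrite | github.com/TeamGraphix/graphqomb | graphqomb/feedforward.py | inverse_dag_from_dag
-- ===== SOURCE A (Python) =====
-- from collections.abc import Iterable, Mapping, MutableMapping
--
-- def inverse_dag_from_dag(
--     dag: Mapping[int, Iterable[int]],
--     all_nodes: Iterable[int] | None = None,
-- ) -> dict[int, set[int]]:
--     r"""Build inverse DAG (node -> dependencies) from parent->children DAG.
--
--     Parameters
--     ----------
--     dag : `collections.abc.Mapping`\[`int`, `collections.abc.Iterable`\[`int`\]\]
--         DAG represented as parent node -> children.
--     all_nodes : `collections.abc.Iterable`\[`int`\] | `None`, optional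
--         Optional full node set to include isolated nodes.
--
--     Returns
--     -------
--     `dict`\[`int`, `set`\[`int`\]\]
--         Inverse DAG represented as node -> dependencies.
--     """
--     nodes = set(all_nodes) if all_nodes is not None else set(dag)
--     for children in dag.values():
--         nodes.update(children)
--
--     inv_dag: dict[int, set[int]] = {node: set() for node in nodes}
--     for parent, children in dag.items():
--         for child in children:
--             inv_dag[child].add(parent)
--
--     return inv_dag
-- ===== SOURCE B (Python) =====
-- def inverse_dag_from_dag(dag, all_nodes=None):
--     """Build inverse DAG (node -> dependencies) by scanning the edge lists per node."""
--     nodes = set(all_nodes) if all_nodes is not None else set(dag)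
--     for children in dag.values():
--         nodes.update(children)
--     return {
--         node: {parent for parent, children in dag.items() if node in children}
--         for node in nodes
--     }
-- ===== Notes on version B (the rewrite author's own statement) =====
-- stated objective: idiomatic
-- what changed: The forward push-pass that mutates per-child accumulator sets is replaced by a single dict comprehension that, for each node, collects its parents by filtering the DAG's edge lists.
import Mathlib
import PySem

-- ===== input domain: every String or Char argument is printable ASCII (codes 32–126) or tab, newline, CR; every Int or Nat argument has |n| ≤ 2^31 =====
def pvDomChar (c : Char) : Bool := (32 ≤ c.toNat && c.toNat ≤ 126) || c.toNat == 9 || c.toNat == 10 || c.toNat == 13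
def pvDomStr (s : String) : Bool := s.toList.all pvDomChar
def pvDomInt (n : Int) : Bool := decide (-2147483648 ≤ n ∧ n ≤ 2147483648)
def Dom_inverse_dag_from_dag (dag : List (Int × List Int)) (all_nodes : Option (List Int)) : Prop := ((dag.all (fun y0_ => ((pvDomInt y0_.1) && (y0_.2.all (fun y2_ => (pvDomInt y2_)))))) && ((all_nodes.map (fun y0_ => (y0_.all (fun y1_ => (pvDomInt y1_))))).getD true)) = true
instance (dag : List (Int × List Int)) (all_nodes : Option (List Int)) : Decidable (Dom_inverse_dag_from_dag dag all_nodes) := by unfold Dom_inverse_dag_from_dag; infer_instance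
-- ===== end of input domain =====

-- B replaces A's forward push-pass (mutating per-child sets) by a per-node filter of the
-- DAG's edge lists (a dict comprehension); same result, different traversal (idiomatic, not faster).


-- ===== PORT A =====
-- shared first phase: nodes = set(all_nodes) if all_nodes is not None else set(dag);
-- for children in dag.values(): nodes.update(children)   (identical in A and B)
def pvNodes (dag : List (Int × List Int)) (all_nodes : Option (List Int)) : PySem.Set Int :=
  let base : PySem.Set Int :=
    match all_nodes with
    | some l => PySem.Set.ofList l
    | none => PySem.Set.ofList (dag.map (·.1))
  dag.foldl (fun s p => PySem.Set.update s p.2) base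

def inverse_dag_from_dag (dag : List (Int × List Int)) (all_nodes : Option (List Int)) : List (Int × List Int) :=
  let nodes := pvNodes dag all_nodes
  -- inv_dag = {node: set() for node in nodes}
  let inv0 : PySem.Dict Int (PySem.Set Int) :=
    nodes.foldl (fun d n => d.insert n PySem.Set.empty) PySem.Dict.empty
  -- for parent, children in dag.items(): for child in children: inv_dag[child].add(parent)
  let inv :=
    dag.foldl (fun d p => p.2.foldl (fun d c => d.modify c [] (fun s => s.add p.1)) d) inv0
  inv.items

-- ===== PORT B =====
def inverse_dag_from_dag_alt (dag : List (Int × List Int)) (all_nodes : Option (List Int)) : List (Int × List Int) :=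
  let nodes := pvNodes dag all_nodes
  -- {node: {parent for parent, children in dag.items() if node in children} for node in nodes}
  nodes.map (fun n =>
    (n, PySem.Set.ofList ((dag.filter (fun p => decide (n ∈ p.2))).map (·.1))))

-- ===== PRECONDITION & SPEC =====
def Spec_inverse_dag_from_dag (dag : List (Int × List Int)) (all_nodes : Option (List Int)) (out : List (Int × List Int)) : Prop := out = inverse_dag_from_dag_alt dag all_nodes
instance (dag : List (Int × List Int)) (all_nodes : Option (List Int)) (out : List (Int × List Int)) : Decidable (Spec_inverse_dag_from_dag dag all_nodes out) := by unfold Spec_inverse_dag_from_dag; infer_instance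

-- ===== CLAIM (what is proved, stated in full; the proofs are below) =====
def Claim_equal_inverse_dag_from_dag : Prop := ∀ (dag : List (Int × List Int)) (all_nodes : Option (List Int)), Dom_inverse_dag_from_dag dag all_nodes → Spec_inverse_dag_from_dag dag all_nodes (inverse_dag_from_dag dag all_nodes)

-- ===== LEMMAS AND PROOFS =====

-- s.add x = s when x already in s
lemma pv_add_mem (s : PySem.Set Int) (x : Int) (h : x ∈ s) : s.add x = s := by
  simp [PySem.Set.add] at *
  simp [h]

lemma pv_update_eq_self (s : PySem.Set Int) (xs : List Int) (h : ∀ x ∈ xs, x ∈ s) :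
    s.update xs = s := by
  induction xs generalizing s with
  | nil => rfl
  | cons x xs ih =>
      have hx : s.add x = s := pv_add_mem s x (h x (by simp))
      simp only [PySem.Set.update, List.foldl_cons] at *
      rw [hx]
      exact ih s (fun y hy => h y (by simp [hy]))

lemma pv_mem_fold_update (dag : List (Int × List Int)) (base : PySem.Set Int) (x : Int)
    (h : x ∈ base) : x ∈ dag.foldl (fun s p => PySem.Set.update s p.2) base := by
  induction dag generalizing base with
  | nil => exact h
  | cons q rest ih =>
      exact ih _ (by rw [PySem.Set.mem_update]; left; exact h)

lemma pv_nodup_fold_update (dag : List (Int × List Int)) (base : PySem.Set Int)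
    (h : base.Nodup) : (dag.foldl (fun s p => PySem.Set.update s p.2) base).Nodup := by
  induction dag generalizing base with
  | nil => exact h
  | cons q rest ih => exact ih _ (PySem.Set.nodup_update _ _ h)

lemma pv_nodup_pvNodes (dag : List (Int × List Int)) (all_nodes : Option (List Int)) :
    (pvNodes dag all_nodes).Nodup := by
  unfold pvNodes
  apply pv_nodup_fold_update
  cases all_nodes <;> exact PySem.Set.nodup_ofList _

-- every child occurring in dag is in pvNodes
lemma pv_child_mem_fold (dag : List (Int × List Int)) (base : PySem.Set Int)
    (p : Int × List Int) (c : Int) (hp : p ∈ dag) (hc : c ∈ p.2) :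
    c ∈ dag.foldl (fun s p => PySem.Set.update s p.2) base := by
  induction dag generalizing base with
  | nil => cases hp
  | cons q rest ih =>
      rcases List.mem_cons.mp hp with h | h
      · subst h
        exact pv_mem_fold_update rest _ c (by rw [PySem.Set.mem_update]; right; exact hc)
      · exact ih _ h

lemma pv_child_mem_pvNodes (dag : List (Int × List Int)) (all_nodes : Option (List Int))
    (p : Int × List Int) (c : Int) (hp : p ∈ dag) (hc : c ∈ p.2) :
    c ∈ pvNodes dag all_nodes :=
  pv_child_mem_fold dag _ p c hp hc

-- phase-2 inner loop: value read back through getD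
lemma pv_getD_inner (cs : List Int) (q : Int) (d : PySem.Dict Int (PySem.Set Int)) (k : Int) :
    ((cs.foldl (fun d c => d.modify c [] (fun s => s.add q)) d).getD k [])
      = if k ∈ cs then (d.getD k []).add q else d.getD k [] := by
  induction cs generalizing d with
  | nil => simp
  | cons c cs ih =>
      simp only [List.foldl_cons]
      rw [ih]
      rw [PySem.Dict.getD_modify]
      by_cases hk : k ∈ cs <;> by_cases hkc : k = c <;>
        simp [hk, hkc]

-- phase-2 outer loop: value at k is the update by all parents whose children contain k
lemma pv_getD_outer (dag : List (Int × List Int)) (d : PySem.Dict Int (PySem.Set Int)) (k : Int) :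
    ((dag.foldl (fun d p => p.2.foldl (fun d c => d.modify c [] (fun s => s.add p.1)) d) d).getD k [])
      = (d.getD k []).update ((dag.filter (fun p => decide (k ∈ p.2))).map (·.1)) := by
  induction dag generalizing d with
  | nil => rfl
  | cons p rest ih =>
      simp only [List.foldl_cons, List.filter_cons]
      rw [ih, pv_getD_inner]
      by_cases hk : k ∈ p.2
      · simp only [hk, decide_true, if_true, List.map_cons]
        rfl
      · simp [hk]

-- keys of the phase-2 result stay equal to nodes
lemma pv_keys_outer (dag : List (Int × List Int)) (nodes : List Int)
    (d : PySem.Dict Int (PySem.Set Int)) (hkeys : d.keys = nodes)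
    (hch : ∀ p ∈ dag, ∀ c ∈ p.2, c ∈ nodes) :
    (dag.foldl (fun d p => p.2.foldl (fun d c => d.modify c [] (fun s => s.add p.1)) d) d).keys
      = nodes := by
  induction dag generalizing d with
  | nil => exact hkeys
  | cons p rest ih =>
      simp only [List.foldl_cons]
      apply ih
      · rw [PySem.Dict.keys_foldl_modify, hkeys]
        exact pv_update_eq_self _ _ (fun c hc => hch p (by simp) c hc)
      · exact fun q hq c hc => hch q (by simp [hq]) c hc

-- phase-1 dict comprehension: items and getD of inv0
lemma pv_items_inv0 (nodes : List Int) (h : nodes.Nodup) :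
    ((nodes.foldl (fun d n => d.insert n PySem.Set.empty) PySem.Dict.empty
        : PySem.Dict Int (PySem.Set Int)).items)
      = nodes.map (fun n => (n, ([] : PySem.Set Int))) := by
  have := PySem.Dict.items_foldl_insert_fresh (l := nodes) (d := (PySem.Dict.empty : PySem.Dict Int (PySem.Set Int)))
    (k := fun n => n) (v := fun _ => PySem.Set.empty)
    (by intro a _; simp [PySem.Dict.contains_empty])
    (by simpa using h)
  simpa [PySem.Set.empty] using this

lemma pv_getD_inv0 (nodes : List Int) (h : nodes.Nodup) (k : Int) (hk : k ∈ nodes) :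
    ((nodes.foldl (fun d n => d.insert n PySem.Set.empty) PySem.Dict.empty
        : PySem.Dict Int (PySem.Set Int)).getD k []) = [] := by
  apply PySem.Dict.getD_of_mem_items
  · rw [pv_items_inv0 nodes h]
    exact List.mem_map.mpr ⟨k, hk, rfl⟩
  · show (List.map _ _).Nodup
    rw [pv_items_inv0 nodes h]
    simpa [List.map_map, Function.comp_def] using h

lemma pv_keys_inv0 (nodes : List Int) (h : nodes.Nodup) :
    ((nodes.foldl (fun d n => d.insert n PySem.Set.empty) PySem.Dict.empty
        : PySem.Dict Int (PySem.Set Int)).keys) = nodes := by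
  show (List.map _ _) = nodes
  rw [pv_items_inv0 nodes h]
  simp [List.map_map, Function.comp_def]

-- ===== VERDICT (by name: the statement is the Claim_ definition above) =====
theorem inverse_dag_from_dag_spec : Claim_equal_inverse_dag_from_dag := by
  intro dag all_nodes _
  show inverse_dag_from_dag dag all_nodes = inverse_dag_from_dag_alt dag all_nodes
  unfold inverse_dag_from_dag inverse_dag_from_dag_alt
  set nodes := pvNodes dag all_nodes with hnodes
  have hnd : nodes.Nodup := pv_nodup_pvNodes dag all_nodes
  set inv0 : PySem.Dict Int (PySem.Set Int) :=
    nodes.foldl (fun d n => d.insert n PySem.Set.empty) PySem.Dict.empty with hinv0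
  have hch : ∀ p ∈ dag, ∀ c ∈ p.2, c ∈ nodes :=
    fun p hp c hc => pv_child_mem_pvNodes dag all_nodes p c hp hc
  have hkeys : (dag.foldl (fun d p => p.2.foldl (fun d c => d.modify c [] (fun s => s.add p.1)) d) inv0).keys = nodes :=
    pv_keys_outer dag nodes inv0 (pv_keys_inv0 nodes hnd) hch
  rw [PySem.Dict.items_eq_map_keys _ (by rw [hkeys]; exact hnd) ([] : PySem.Set Int), hkeys]
  apply List.map_congr_left
  intro k hk
  rw [pv_getD_outer, pv_getD_inv0 nodes hnd k hk]
  rfl
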